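-- pv_equiv track=rewrite | github.com/kmfb/notebooklm-artifact-orchestrator | skills/telegram-book-fetch/scripts/fetch_book_from_telegram_bot.py | choose_best_command
-- ===== SOURCE A (Python) =====
-- from typing import Dict, List, Optional, Sequence, Tuple
--
-- def choose_best_command(items: Sequence[Dict[str, str]], preferred_exts: Sequence[str]) -> Optional[Dict[str, str]]:
--     if not items:
--         return None
--     scored = []
--     for it in items:
--         ext = it.get("ext", "")
--         rank = preferred_exts.index(ext) if ext in preferred_exts else len(preferred_exts) + 5
--         scored.append((rank, it))
--     scored.sort(key=lambda x: x[0])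
--     return scored[0][1]
-- ===== SOURCE B (Python) =====
-- from typing import Dict, List, Optional, Sequence, Tuple
--
-- def choose_best_command(items: Sequence[Dict[str, str]], preferred_exts: Sequence[str]) -> Optional[Dict[str, str]]:
--     # Single pass: track the best item and its rank; strict '<' keeps the earliest
--     # item among equal ranks, matching the stable sort of the original.
--     best = None
--     best_rank = None
--     for it in items:
--         ext = it.get("ext", "")
--         rank = preferred_exts.index(ext) if ext in preferred_exts else len(preferred_exts) + 5
--         if best is None or rank < best_rank:
--             best, best_rank = it, rank
--     return best
-- ===== Notes on version B (the rewrite author's own statement) =====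
-- stated objective: simpler
-- what changed: Replaces building a scored list and stably sorting it with a single pass that tracks the best item and its rank, updating only on strictly smaller rank so the earliest item wins ties.
import Mathlib
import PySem

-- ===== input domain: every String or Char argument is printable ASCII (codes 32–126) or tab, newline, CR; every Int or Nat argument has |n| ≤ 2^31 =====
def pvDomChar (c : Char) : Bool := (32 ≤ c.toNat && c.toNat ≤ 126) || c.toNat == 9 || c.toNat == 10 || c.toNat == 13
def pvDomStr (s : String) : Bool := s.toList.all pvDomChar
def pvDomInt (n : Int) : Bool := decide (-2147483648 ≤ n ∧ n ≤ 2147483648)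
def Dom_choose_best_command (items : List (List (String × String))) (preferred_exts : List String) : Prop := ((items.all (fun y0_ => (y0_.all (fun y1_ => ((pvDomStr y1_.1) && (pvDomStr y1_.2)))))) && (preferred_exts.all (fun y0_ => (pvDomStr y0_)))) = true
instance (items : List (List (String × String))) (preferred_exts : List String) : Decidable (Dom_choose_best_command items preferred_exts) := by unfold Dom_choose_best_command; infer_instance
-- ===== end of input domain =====

-- B replaces scored-list + stable sort by a single pass tracking the best item and its rank (strict '<' preserves first-wins ties): simpler, same results.


-- ===== PORT A =====
-- rank of one item: preferred_exts.index(it.get("ext","")) if present, else len+5 (shared by both Pythons verbatim)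
def pvRank (preferred_exts : List String) (it : List (String × String)) : Int :=
  let ext := PySem.Dict.getD (PySem.Dict.mk it) "ext" ""
  if ext ∈ preferred_exts then ((PySem.List.index? preferred_exts ext).getD 0 : Int)
  else (preferred_exts.length : Int) + 5

def choose_best_command (items : List (List (String × String))) (preferred_exts : List String) : Option (List (String × String)) :=
  if items = [] then none
  else
    let scored := items.foldl (fun acc it => acc ++ [(pvRank preferred_exts it, it)])
      ([] : List (Int × List (String × String)))
    (PySem.List.sorted scored (fun x => x.1) false).head?.map (fun x => x.2)

-- ===== PORT B =====
def choose_best_command_alt (items : List (List (String × String))) (preferred_exts : List String) : Option (List (String × String)) :=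
  (items.foldl (fun best it =>
      let rank := pvRank preferred_exts it
      match best with
      | none => some (it, rank)
      | some (b, br) => if rank < br then some (it, rank) else some (b, br))
    (none : Option (List (String × String) × Int))).map (fun x => x.1)

-- ===== PRECONDITION & SPEC =====
def Spec_choose_best_command (items : List (List (String × String))) (preferred_exts : List String) (out : Option (List (String × String))) : Prop := out = choose_best_command_alt items preferred_exts
instance (items : List (List (String × String))) (preferred_exts : List String) (out : Option (List (String × String))) : Decidable (Spec_choose_best_command items preferred_exts out) := by unfold Spec_choose_best_command; infer_instance

-- ===== CLAIM (what is proved, stated in full; the proofs are below) =====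
def Claim_equal_choose_best_command : Prop := ∀ (items : List (List (String × String))) (preferred_exts : List String), Dom_choose_best_command items preferred_exts → Spec_choose_best_command items preferred_exts (choose_best_command items preferred_exts)

-- ===== LEMMAS AND PROOFS =====

-- head of insertBy (strict-< comparator) is exactly B's running-min update
theorem head?_insertBy {σ : Type} (key : σ → Int) (x : σ) (acc : List σ) :
    (PySem.List.insertBy (fun a b => decide (key a < key b)) x acc).head?
      = some (match acc.head? with
              | none => x
              | some m => if key x < key m then x else m) := by
  cases acc with
  | nil => simp [PySem.List.insertBy]
  | cons y ys =>
    by_cases h : key x < key y <;> simp [PySem.List.insertBy, h]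

-- head of the insertion-sort fold = first-minimum fold
theorem head?_foldl_insertBy {σ : Type} (key : σ → Int) (xs : List σ) (acc : List σ) :
    (xs.foldl (fun acc x => PySem.List.insertBy (fun a b => decide (key a < key b)) x acc) acc).head?
      = xs.foldl (fun b x =>
          match b with
          | none => some x
          | some m => if key x < key m then some x else some m) acc.head? := by
  induction xs generalizing acc with
  | nil => rfl
  | cons x t ih =>
    simp only [List.foldl_cons]
    rw [ih, head?_insertBy]
    cases acc with
    | nil => rfl
    | cons y ys =>
      simp only [List.head?_cons]
      congr 1
      split <;> rfl

-- B's fold over items is the swapped first-minimum fold over the scored pairs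
theorem alt_foldl_swap (preferred_exts : List String)
    (items : List (List (String × String))) (b : Option (List (String × String) × Int)) :
    items.foldl (fun best it =>
        let rank := pvRank preferred_exts it
        match best with
        | none => some (it, rank)
        | some (b, br) => if rank < br then some (it, rank) else some (b, br)) b
      = Option.map Prod.swap
          ((items.map (fun it => (pvRank preferred_exts it, it))).foldl
            (fun m x =>
              match m with
              | none => some x
              | some m => if x.1 < m.1 then some x else some m)
            (Option.map Prod.swap b)) := by
  induction items generalizing b with
  | nil => cases b <;> rfl
  | cons it t ih =>
    simp only [List.foldl_cons, List.map_cons]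
    rw [ih]
    cases b with
    | none => rfl
    | some p =>
      by_cases h : pvRank preferred_exts it < p.2 <;> simp [Prod.swap, h]

-- ===== VERDICT (by name: the statement is the Claim_ definition above) =====
theorem choose_best_command_spec : Claim_equal_choose_best_command := by
  intro items preferred_exts _
  show choose_best_command items preferred_exts = choose_best_command_alt items preferred_exts
  unfold choose_best_command choose_best_command_alt
  rw [alt_foldl_swap]
  by_cases h : items = []
  · subst h; rfl
  · simp only [h, if_false]
    rw [PySem.List.foldl_append_singleton_eq_map, List.nil_append,
        PySem.List.sorted_eq_foldl_insertBy, head?_foldl_insertBy]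
    rw [Option.map_map]
    have h2 : ([] : List (Int × List (String × String))).head?
        = Option.map Prod.swap (none : Option (List (String × String) × Int)) := rfl
    rw [h2]
    congr 1
    apply PySem.List.foldl_congr_mem
    intro acc x _
    cases acc <;> rfl
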